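-- pv_equiv track=rewrite | github.com/akikan/createFeatureVector | column2feature.py | Flag2Feature
-- ===== SOURCE A (Python) =====
-- def Flag2Feature(column, dictionary):
-- 	# if dictionary is None:
-- 	# 	dictionary = makeDictionary(column)
--
-- 	colLen = len(column)
-- 	ret = []
-- 	for word in dictionary:
-- 		temp = [0]*colLen
-- 		for i,cell in enumerate(column):
-- 			if cell.count(word) > 0:
-- 				temp[i] = 1
-- 		ret.append(temp)
-- 	return ret
-- ===== SOURCE B (Python) =====
-- def Flag2Feature(column, dictionary):
--     # cell-major pass: one flag row per cell, using short-circuiting `in`,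
--     # then transpose to the word-major layout A returns
--     cols = [[1 if word in cell else 0 for word in dictionary] for cell in column]
--     return [[row[j] for row in cols] for j in range(len(dictionary))]
-- ===== Notes on version B (the rewrite author's own statement) =====
-- stated objective: alternative
-- what changed: B traverses cell-major (one flag row per cell, substring test via short-circuiting `in` instead of count()) and transposes at the end, instead of A's word-major loops that build each row by mutating a zero-filled list.
import Mathlib
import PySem

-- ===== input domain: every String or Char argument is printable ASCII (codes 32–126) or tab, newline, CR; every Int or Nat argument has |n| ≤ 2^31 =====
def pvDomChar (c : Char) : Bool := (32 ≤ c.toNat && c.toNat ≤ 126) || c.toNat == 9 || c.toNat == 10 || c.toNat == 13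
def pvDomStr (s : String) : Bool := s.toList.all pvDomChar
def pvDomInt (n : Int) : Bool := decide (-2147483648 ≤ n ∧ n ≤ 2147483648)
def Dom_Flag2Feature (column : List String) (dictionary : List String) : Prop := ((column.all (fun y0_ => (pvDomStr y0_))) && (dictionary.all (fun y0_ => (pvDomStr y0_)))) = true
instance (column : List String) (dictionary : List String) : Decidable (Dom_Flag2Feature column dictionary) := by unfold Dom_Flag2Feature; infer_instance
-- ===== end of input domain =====

-- B: cell-major flag rows (substring via `in`) followed by a transpose, instead of A's word-major loops mutating a zero-filled row; same results, alternative structure.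


-- ===== PORT A =====
-- literal port: for word in dictionary: temp = [0]*colLen; for i,cell in enumerate(column): if cell.count(word) > 0: temp[i] = 1; ret.append(temp)
-- (the enumerate index i is always ≥ 0 and < len(temp), so `temp.set i.toNat 1` is exactly Python's temp[i] = 1)
def Flag2Feature (column : List String) (dictionary : List String) : List (List Int) :=
  let colLen := column.length
  dictionary.foldl (fun ret word =>
    let temp := List.replicate colLen (0 : Int)
    let temp := (PySem.List.enumerate column 0).foldl
      (fun temp ic => if PySem.Str.count ic.2 word > 0 then temp.set ic.1.toNat 1 else temp) temp
    ret ++ [temp]) []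

-- ===== PORT B =====
-- literal port of Source B: cols = [[1 if word in cell else 0 for word in dictionary] for cell in column];
-- return [[row[j] for row in cols] for j in range(len(dictionary))]  (j always in range of each row, ported with pyGetD)
def Flag2Feature_alt (column : List String) (dictionary : List String) : List (List Int) :=
  let cols := column.map (fun cell => dictionary.map (fun word => if PySem.Str.isIn word cell then (1 : Int) else 0))
  (PySem.List.pyRange 0 (dictionary.length : Int) 1).map (fun j =>
    cols.map (fun row => PySem.List.pyGetD row j 0))

-- ===== PRECONDITION & SPEC =====
def Spec_Flag2Feature (column : List String) (dictionary : List String) (out : List (List Int)) : Prop := out = Flag2Feature_alt column dictionary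
instance (column : List String) (dictionary : List String) (out : List (List Int)) : Decidable (Spec_Flag2Feature column dictionary out) := by unfold Spec_Flag2Feature; infer_instance

-- ===== CLAIM (what is proved, stated in full; the proofs are below) =====
def Claim_equal_Flag2Feature : Prop := ∀ (column : List String) (dictionary : List String), Dom_Flag2Feature column dictionary → Spec_Flag2Feature column dictionary (Flag2Feature column dictionary)

-- ===== LEMMAS AND PROOFS =====

-- count.go never decreases the accumulator
theorem countGo_le (sub : List Char) : ∀ (fuel : Nat) (l : List Char) (acc : Nat),
    acc ≤ PySem.Chars.count.go sub fuel l acc := by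
  intro fuel
  induction fuel with
  | zero => intro l acc; cases l <;> simp [PySem.Chars.count.go]
  | succ n ih =>
    intro l acc
    cases l with
    | nil => simp [PySem.Chars.count.go]
    | cons h t =>
      simp only [PySem.Chars.count.go]
      split
      · exact le_trans (Nat.le_succ acc) (ih _ _)
      · exact ih _ _

-- count.go strictly increases the accumulator iff some suffix starts with sub (sub nonempty, enough fuel)
theorem countGo_pos (sub : List Char) (hsub : sub ≠ []) : ∀ (fuel : Nat) (l : List Char) (acc : Nat),
    l.length ≤ fuel →
    (acc < PySem.Chars.count.go sub fuel l acc ↔ ∃ j, sub <+: l.drop j) := by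
  intro fuel
  induction fuel with
  | zero =>
    intro l acc hlen
    have hl : l = [] := List.eq_nil_of_length_eq_zero (Nat.le_zero.mp hlen)
    subst hl
    simp [PySem.Chars.count.go, List.drop_nil]
    exact hsub
  | succ n ih =>
    intro l acc hlen
    cases l with
    | nil =>
      simp [PySem.Chars.count.go, List.drop_nil]
      exact hsub
    | cons h t =>
      simp only [PySem.Chars.count.go]
      by_cases hp : sub.isPrefixOf (h :: t) = true
      · rw [if_pos hp]
        constructor
        · intro _
          exact ⟨0, by simpa using (List.isPrefixOf_iff_prefix.mp hp)⟩
        · intro _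
          exact lt_of_lt_of_le (Nat.lt_succ_self acc) (countGo_le sub n _ (acc + 1))
      · rw [if_neg hp]
        have hlen' : t.length ≤ n := by simpa using hlen
        rw [ih t acc hlen']
        constructor
        · rintro ⟨j, hj⟩; exact ⟨j + 1, by simpa using hj⟩
        · rintro ⟨j, hj⟩
          cases j with
          | zero =>
            exact absurd (List.isPrefixOf_iff_prefix.mpr (by simpa using hj)) hp
          | succ j' => exact ⟨j', by simpa using hj⟩

-- cell.count(word) > 0 is exactly `word in cell`
theorem count_pos_iff_isIn (cell word : String) :
    (0 < PySem.Str.count cell word) ↔ PySem.Str.isIn word cell = true := by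
  rw [show PySem.Str.count cell word = PySem.Chars.count cell.toList word.toList from by
        simp [pysem]]
  rw [show PySem.Str.isIn word cell = PySem.Chars.isIn word.toList cell.toList from by
        simp [pysem]]
  unfold PySem.Chars.count
  by_cases hw : word.toList.isEmpty
  · have hnil : word.toList = [] := by simpa [List.isEmpty_iff] using hw
    rw [hnil]
    simp [PySem.Chars.isIn_nil]
  · have hne : word.toList ≠ [] := by simpa [List.isEmpty_iff] using hw
    rw [if_neg hw]
    rw [countGo_pos word.toList hne cell.toList.length cell.toList 0 (le_refl _)]
    exact PySem.Chars.exists_prefix_drop_iff_isIn word.toList cell.toList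
 
-- A's inner loop: setting index i of a zero block for each flagged cell maps the flag over the cells
theorem setloop (p : String → Prop) [DecidablePred p] :
    ∀ (cells : List String) (pre : List Int),
    (PySem.List.enumerate cells (pre.length : Int)).foldl
      (fun temp ic => if p ic.2 then temp.set ic.1.toNat 1 else temp)
      (pre ++ List.replicate cells.length 0)
    = pre ++ cells.map (fun c => if p c then 1 else 0) := by
  intro cells
  induction cells with
  | nil => intro pre; simp [PySem.List.enumerate_nil]
  | cons c t ih =>
    intro pre
    rw [PySem.List.enumerate_cons]
    simp only [List.foldl_cons, List.length_cons, List.replicate_succ]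
    have hset : ((pre ++ 0 :: List.replicate t.length 0).set ((pre.length : Int)).toNat 1)
        = (pre ++ [(1 : Int)]) ++ List.replicate t.length 0 := by
      rw [Int.toNat_natCast, List.set_append_right _ _ (le_refl pre.length)]
      simp
    have hkeep : (pre ++ 0 :: List.replicate t.length 0)
        = (pre ++ [(0 : Int)]) ++ List.replicate t.length 0 := by simp
    by_cases hc : p c
    · simp only [hc, if_true, hset]
      have := ih (pre ++ [(1 : Int)])
      rw [show ((pre ++ [(1:Int)]).length : Int) = (pre.length : Int) + 1 by simp] at this
      rw [this]
      simp [hc]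
    · simp only [hc, if_false]
      rw [hkeep]
      have := ih (pre ++ [(0 : Int)])
      rw [show ((pre ++ [(0:Int)]).length : Int) = (pre.length : Int) + 1 by simp] at this
      rw [this]
      simp [hc]

-- the pre = [] instance of setloop, in the exact shape A's inner loop has
theorem setloop0 (p : String → Prop) [DecidablePred p] (cells : List String) :
    (PySem.List.enumerate cells 0).foldl
      (fun temp ic => if p ic.2 then temp.set ic.1.toNat 1 else temp)
      (List.replicate cells.length (0 : Int))
    = cells.map (fun c => if p c then (1 : Int) else 0) := by
  have := setloop p cells []
  simpa using this

-- a map over range(0, len xs) whose body agrees with g at each index is a map over xs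
theorem map_pyRange_eq_map {α β : Type} (xs : List α) (f : Int → β) (g : α → β)
    (h : ∀ (k : Nat) (hk : k < xs.length), f (k : Int) = g xs[k]) :
    (PySem.List.pyRange 0 (xs.length : Int) 1).map f = xs.map g := by
  apply List.ext_getElem
  · simp [PySem.List.length_pyRange_one]
  · intro i h1 h2
    have hi : i < xs.length := by simpa using h2
    have hib : i < (PySem.List.pyRange 0 (xs.length : Int) 1).length := by
      rw [PySem.List.length_pyRange_one]; omega
    rw [List.getElem_map, List.getElem_map]
    have hge : (PySem.List.pyRange 0 (xs.length : Int) 1)[i]'hib = (0 : Int) + i := by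
      rw [PySem.List.getElem_pyRange_one]
    rw [hge]
    simpa using h i hi

-- canonical form shared by both ports
theorem A_canon (column dictionary : List String) :
    Flag2Feature column dictionary
    = dictionary.map (fun w => column.map (fun c => if PySem.Str.isIn w c then (1 : Int) else 0)) := by
  simp only [Flag2Feature, gt_iff_lt]
  rw [PySem.List.foldl_append_singleton_eq_map]
  apply List.map_congr_left
  intro w _
  rw [setloop0 (fun cell => 0 < PySem.Str.count cell w) column]
  apply List.map_congr_left
  intro c _
  by_cases h : PySem.Str.isIn w c = true
  · rw [if_pos ((count_pos_iff_isIn c w).mpr h), if_pos h]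
  · rw [if_neg (fun hp => h ((count_pos_iff_isIn c w).mp hp)), if_neg h]

theorem B_canon (column dictionary : List String) :
    Flag2Feature_alt column dictionary
    = dictionary.map (fun w => column.map (fun c => if PySem.Str.isIn w c then (1 : Int) else 0)) := by
  simp only [Flag2Feature_alt]
  apply map_pyRange_eq_map dictionary _ _
  intro k hk
  rw [List.map_map]
  apply List.map_congr_left
  intro cell _
  simp only [Function.comp]
  rw [PySem.List.pyGetD_natCast, List.getD_eq_getElem _ _ (by simpa using hk), List.getElem_map]

-- ===== VERDICT (by name: the statement is the Claim_ definition above) =====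
theorem Flag2Feature_spec : Claim_equal_Flag2Feature := by
  intro column dictionary _
  unfold Spec_Flag2Feature
  rw [A_canon, B_canon]
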